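-- pv_equiv track=rewrite | github.com/wenlongli10/VADTree | HGTree_generation.py | fine_completion
-- ===== SOURCE A (Python) =====
-- def fine_completion(coarse, fine, frames):
--
--     common = []
--     if fine[0][0]!=0:
--         fine.insert(0, coarse[0])
--     if fine[-1][-1]!=frames-1:
--         fine.append(coarse[-1])
--
--     for i in range(len(fine)-1):
--         if fine[i][1]!= fine[i+1][0]:
--             for j in coarse:
--                 if j[0]>=fine[i][1] and j[1]<=fine[i+1][0]:
--                     common.append(j)
--
--     fine.extend(common)
--     fine.sort()
--     return fine
-- ===== SOURCE B (Python) =====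
-- def _bisect_left(a, x):
--     lo, hi = 0, len(a)
--     while lo < hi:
--         mid = (lo + hi) // 2
--         if a[mid] < x:
--             lo = mid + 1
--         else:
--             hi = mid
--     return lo
--
-- def fine_completion(coarse, fine, frames):
--     # return-value equivalent to A; does not mutate `fine` (A does)
--     f = list(fine)
--     if f[0][0] != 0:
--         f = [coarse[0]] + f
--     if f[-1][1] != frames - 1:
--         f = f + [coarse[-1]]
--     cs = sorted(coarse)
--     starts = [c[0] for c in cs]
--     out = list(f)
--     for a, b in zip(f, f[1:]):
--         if a[1] != b[0]:
--             k = _bisect_left(starts, a[1])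
--             for c in cs[k:]:
--                 if c[1] <= b[0]:
--                     out.append(c)
--     out.sort()
--     return out
-- ===== Notes on version B (the rewrite author's own statement) =====
-- stated objective: faster
-- what changed: B sorts coarse once and, for each gap, uses a hand-written binary search (bisect_left on the start values) to skip every coarse interval starting before the gap, instead of A's full rescan of coarse for every gap; B also does not mutate the fine argument (A does) - the equivalence is about the return value.
import Mathlib
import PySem

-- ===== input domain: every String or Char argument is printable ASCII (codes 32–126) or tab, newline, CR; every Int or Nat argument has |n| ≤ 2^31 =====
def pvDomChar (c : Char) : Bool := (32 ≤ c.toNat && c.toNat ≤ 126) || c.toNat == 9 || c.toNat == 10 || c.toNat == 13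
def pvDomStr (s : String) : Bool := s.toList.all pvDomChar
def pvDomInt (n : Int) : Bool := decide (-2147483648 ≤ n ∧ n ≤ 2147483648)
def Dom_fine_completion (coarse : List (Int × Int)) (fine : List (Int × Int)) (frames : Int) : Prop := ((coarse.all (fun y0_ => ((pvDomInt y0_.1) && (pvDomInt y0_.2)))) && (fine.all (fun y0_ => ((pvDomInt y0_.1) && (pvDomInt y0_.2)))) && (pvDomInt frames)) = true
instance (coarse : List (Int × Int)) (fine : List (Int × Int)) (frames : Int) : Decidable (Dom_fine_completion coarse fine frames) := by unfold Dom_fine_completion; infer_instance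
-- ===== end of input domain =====

-- B sorts coarse once and binary-searches (bisect_left on the start values) the first coarse
-- interval that can fit each gap, instead of A's full rescan of coarse per gap.  Equivalence is
-- about the RETURN value: Python A mutates its `fine` argument in place, B does not.

-- ===== PORT A =====
-- fine[0][0] / coarse[0] / fine[-1][-1] / coarse[-1]: pyGet? with a default, exact inside
-- Pre_fine_completion (which guarantees the Option is `some`).
def fine_completion (coarse : List (Int × Int)) (fine : List (Int × Int)) (frames : Int) : List (Int × Int) :=
  let fine1 := if ((PySem.List.pyGet? fine 0).getD (0, 0)).1 ≠ 0 then
      PySem.List.insert fine 0 ((PySem.List.pyGet? coarse 0).getD (0, 0))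
    else fine
  let fine2 := if ((PySem.List.pyGet? fine1 (-1)).getD (0, 0)).2 ≠ frames - 1 then
      fine1 ++ [(PySem.List.pyGet? coarse (-1)).getD (0, 0)]
    else fine1
  let common := (PySem.List.pyRange 0 ((fine2.length : Int) - 1) 1).foldl (fun acc i =>
      if (PySem.List.pyGetD fine2 i (0, 0)).2 ≠ (PySem.List.pyGetD fine2 (i + 1) (0, 0)).1 then
        coarse.foldl (fun acc2 j =>
          if j.1 ≥ (PySem.List.pyGetD fine2 i (0, 0)).2 ∧ j.2 ≤ (PySem.List.pyGetD fine2 (i + 1) (0, 0)).1 then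
            acc2 ++ [j]
          else acc2) acc
      else acc) []
  PySem.List.sorted (fine2 ++ common) (fun p => toLex p) false

-- ===== PORT B =====
-- hand-written binary search `_bisect_left` from Source B, ported step for step as structural
-- recursion on hi - lo (exact: the loop only reads a[mid] with lo ≤ mid < hi ≤ len, in range)
def pvBisect (a : List Int) (x : Int) (lo hi : Nat) : Nat :=
  if _h : lo < hi then
    let mid := (lo + hi) / 2
    if a.getD mid 0 < x then pvBisect a x (mid + 1) hi
    else pvBisect a x lo mid
  else lo
termination_by hi - lo
decreasing_by all_goals omega

def fine_completion_alt (coarse : List (Int × Int)) (fine : List (Int × Int)) (frames : Int) : List (Int × Int) :=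
  let f0 := fine
  let f1 := if ((PySem.List.pyGet? f0 0).getD (0, 0)).1 ≠ 0 then
      [(PySem.List.pyGet? coarse 0).getD (0, 0)] ++ f0
    else f0
  let f2 := if ((PySem.List.pyGet? f1 (-1)).getD (0, 0)).2 ≠ frames - 1 then
      f1 ++ [(PySem.List.pyGet? coarse (-1)).getD (0, 0)]
    else f1
  let cs := PySem.List.sorted coarse (fun p => toLex p) false
  let starts := cs.map (·.1)
  let out := (f2.zip (PySem.List.slice f2 (some 1) none)).foldl (fun out p =>
      if p.1.2 ≠ p.2.1 then
        let k := pvBisect starts p.1.2 0 starts.length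
        (PySem.List.slice cs (some (k : Int)) none).foldl
          (fun o c => if c.2 ≤ p.2.1 then o ++ [c] else o) out
      else out) f2
  PySem.List.sorted out (fun p => toLex p) false

-- ===== PRECONDITION & SPEC =====
-- Pre_ excludes exactly the inputs where Python A raises IndexError: empty `fine`, and empty
-- `coarse` when one of the two boundary checks needs coarse[0] / coarse[-1].
def Pre_fine_completion (coarse : List (Int × Int)) (fine : List (Int × Int)) (frames : Int) : Prop :=
  fine ≠ [] ∧ (((fine.headD (0, 0)).1 ≠ 0 ∨ (fine.getLastD (0, 0)).2 ≠ frames - 1) → coarse ≠ [])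
instance (coarse : List (Int × Int)) (fine : List (Int × Int)) (frames : Int) : Decidable (Pre_fine_completion coarse fine frames) := by unfold Pre_fine_completion; infer_instance
def pvWitness_fine_completion : (List (Int × Int)) × (List (Int × Int)) × Int := ([(0, 4)], [(0, 2)], 3)

def Spec_fine_completion (coarse : List (Int × Int)) (fine : List (Int × Int)) (frames : Int) (out : List (Int × Int)) : Prop := out = fine_completion_alt coarse fine frames
instance (coarse : List (Int × Int)) (fine : List (Int × Int)) (frames : Int) (out : List (Int × Int)) : Decidable (Spec_fine_completion coarse fine frames out) := by unfold Spec_fine_completion; infer_instance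

-- ===== CLAIM (what is proved, stated in full; the proofs are below) =====
def Claim_equal_fine_completion : Prop := ∀ (coarse : List (Int × Int)) (fine : List (Int × Int)) (frames : Int), Dom_fine_completion coarse fine frames → Pre_fine_completion coarse fine frames → Spec_fine_completion coarse fine frames (fine_completion coarse fine frames)

-- ===== LEMMAS AND PROOFS =====

-- the index loop 'for i in range(len(l)-1)' visits exactly the adjacent pairs of l
theorem pv_pairs_eq (l : List (Int × Int)) (d : Int × Int) :
    (PySem.List.pyRange 0 ((l.length : Int) - 1) 1).map
      (fun i => (PySem.List.pyGetD l i d, PySem.List.pyGetD l (i + 1) d)) = l.zip l.tail := by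
  apply List.ext_getElem
  · simp only [List.length_map, PySem.List.length_pyRange_one, List.length_zip, List.length_tail]
    omega
  · intro k h1 h2
    have hk : k < l.length - 1 := by
      simpa [PySem.List.length_pyRange_one] using h1
    have e1 : PySem.List.pyGetD l ((0 : Int) + (k : Int)) d = l[k]'(by omega) := by
      rw [PySem.List.pyGetD_eq_getElem l d (by omega) (by exact_mod_cast (by omega : (0:Int) + k < l.length))]
      simp
    have e2 : PySem.List.pyGetD l ((0 : Int) + (k : Int) + 1) d = l[k + 1]'(by omega) := by
      rw [PySem.List.pyGetD_eq_getElem l d (by omega) (by exact_mod_cast (by omega : ((0:Int) + k + 1) < l.length))]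
      simp only [show ((0 : Int) + (k : Int) + 1) = ((k + 1 : Nat) : Int) by push_cast; ring,
        Int.toNat_natCast]
    simp only [List.getElem_map, PySem.List.getElem_pyRange_one, e1, e2, List.getElem_zip,
      List.getElem_tail]

-- A's gap loop, re-expressed as a flatMap over the adjacent pairs of f2
theorem pv_common_eq (coarse f2 : List (Int × Int)) :
    (PySem.List.pyRange 0 ((f2.length : Int) - 1) 1).foldl (fun acc i =>
      if (PySem.List.pyGetD f2 i (0, 0)).2 ≠ (PySem.List.pyGetD f2 (i + 1) (0, 0)).1 then
        coarse.foldl (fun acc2 j =>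
          if j.1 ≥ (PySem.List.pyGetD f2 i (0, 0)).2 ∧ j.2 ≤ (PySem.List.pyGetD f2 (i + 1) (0, 0)).1 then
            acc2 ++ [j]
          else acc2) acc
      else acc) []
    = (f2.zip f2.tail).flatMap (fun p =>
        if p.1.2 ≠ p.2.1 then coarse.filter (fun j => decide (p.1.2 ≤ j.1 ∧ j.2 ≤ p.2.1)) else []) := by
  have hstep : ∀ (acc : List (Int × Int)) (i : Int),
      (if (PySem.List.pyGetD f2 i (0, 0)).2 ≠ (PySem.List.pyGetD f2 (i + 1) (0, 0)).1 then
        coarse.foldl (fun acc2 j =>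
          if j.1 ≥ (PySem.List.pyGetD f2 i (0, 0)).2 ∧ j.2 ≤ (PySem.List.pyGetD f2 (i + 1) (0, 0)).1 then
            acc2 ++ [j]
          else acc2) acc
      else acc)
      = acc ++ (if (PySem.List.pyGetD f2 i (0, 0)).2 ≠ (PySem.List.pyGetD f2 (i + 1) (0, 0)).1 then
          coarse.filter (fun j => decide ((PySem.List.pyGetD f2 i (0, 0)).2 ≤ j.1 ∧ j.2 ≤ (PySem.List.pyGetD f2 (i + 1) (0, 0)).1))
        else []) := by
    intro acc i
    split_ifs with h
    · rw [PySem.List.foldl_append_ite_eq_filter]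
    · simp
  rw [PySem.List.foldl_congr_mem _ _ (fun acc i =>
      acc ++ (if (PySem.List.pyGetD f2 i (0, 0)).2 ≠ (PySem.List.pyGetD f2 (i + 1) (0, 0)).1 then
          coarse.filter (fun j => decide ((PySem.List.pyGetD f2 i (0, 0)).2 ≤ j.1 ∧ j.2 ≤ (PySem.List.pyGetD f2 (i + 1) (0, 0)).1))
        else [])) _ (fun acc i _ => hstep acc i)]
  rw [PySem.List.foldl_append_eq_flatMap]
  rw [← pv_pairs_eq f2 (0, 0), List.flatMap_map]
  simp only [List.nil_append]

-- correctness of the hand-written binary search on a sorted list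
def pvBisectGood (a : List Int) (x : Int) (k : Nat) : Prop :=
  k ≤ a.length ∧ (∀ i : Nat, (h : i < a.length) → i < k → a[i] < x) ∧
    (∀ i : Nat, k ≤ i → (h : i < a.length) → x ≤ a[i])

theorem pvBisect_spec_aux (a : List Int) (x : Int) (hs : a.Pairwise (· ≤ ·)) :
    ∀ (n lo hi : Nat), hi - lo ≤ n → hi ≤ a.length → lo ≤ hi →
    (∀ i : Nat, i < lo → (h : i < a.length) → a[i] < x) →
    (∀ i : Nat, hi ≤ i → (h : i < a.length) → x ≤ a[i]) →
    pvBisectGood a x (pvBisect a x lo hi) := by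
  intro n
  induction n with
  | zero =>
    intro lo hi hn hhi hlh hlo hup
    rw [pvBisect, dif_neg (by omega : ¬ lo < hi)]
    exact ⟨by omega, fun i h hik => hlo i hik h, fun i h1 h2 => hup i (by omega) h2⟩
  | succ n ih =>
    intro lo hi hn hhi hlh hlo hup
    by_cases h : lo < hi
    · rw [pvBisect, dif_pos h]
      show pvBisectGood a x (if a.getD ((lo + hi) / 2) 0 < x then
          pvBisect a x ((lo + hi) / 2 + 1) hi else pvBisect a x lo ((lo + hi) / 2))
      set mid := (lo + hi) / 2 with hm
      have hmlt : mid < a.length := by omega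
      rw [List.getD_eq_getElem a 0 hmlt]
      have hp := List.pairwise_iff_getElem.mp hs
      by_cases hc : a[mid] < x
      · rw [if_pos hc]
        refine ih (mid + 1) hi (by omega) hhi (by omega) ?_ hup
        intro i hik hil
        rcases Nat.lt_or_ge i mid with hlt | hge
        · exact lt_of_le_of_lt (hp i mid hil hmlt hlt) hc
        · have : i = mid := by omega
          subst this; exact hc
      · rw [if_neg hc]
        refine ih lo mid (by omega) (by omega) (by omega) hlo ?_
        intro i hik hil
        rcases Nat.eq_or_lt_of_le hik with he | hlt
        · subst he; exact not_lt.mp hc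
        · exact le_trans (not_lt.mp hc) (hp mid i hmlt hil hlt)
    · rw [pvBisect, dif_neg h]
      exact ⟨by omega, fun i hil hik => hlo i hik hil, fun i h1 h2 => hup i (by omega) h2⟩

theorem pvBisect_spec_top (a : List Int) (x : Int) (hs : a.Pairwise (· ≤ ·)) :
    pvBisectGood a x (pvBisect a x 0 a.length) :=
  pvBisect_spec_aux a x hs a.length 0 a.length (by omega) (le_refl _) (by omega)
    (fun i h1 _ => absurd h1 (Nat.not_lt_zero i)) (fun i h1 h2 => absurd h2 (by omega))

-- the bisect-then-scan of B collects, per gap, exactly A's filter over the sorted coarse list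
theorem pv_filter_drop (cs : List (Int × Int)) (x hi : Int)
    (hs : cs.Pairwise (fun p q => p.1 ≤ q.1)) :
    (cs.drop (pvBisect (cs.map (·.1)) x 0 (cs.map (·.1)).length)).filter
        (fun j => decide (j.2 ≤ hi))
      = cs.filter (fun j => decide (x ≤ j.1 ∧ j.2 ≤ hi)) := by
  have hsa : (cs.map (·.1)).Pairwise (· ≤ ·) := List.Pairwise.map _ (fun _ _ h => h) hs
  obtain ⟨h3, h1, h2⟩ := pvBisect_spec_top (cs.map (·.1)) x hsa
  set k := pvBisect (cs.map (·.1)) x 0 (cs.map (·.1)).length with hk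
  have hlen : (cs.map (·.1)).length = cs.length := by simp
  have h3' : k ≤ cs.length := hlen ▸ h3
  conv_rhs => rw [← List.take_append_drop k cs]
  rw [List.filter_append]
  have htake : (cs.take k).filter (fun j => decide (x ≤ j.1 ∧ j.2 ≤ hi)) = [] := by
    rw [List.filter_eq_nil_iff]
    intro j hj
    obtain ⟨i, hil, hie⟩ := List.mem_iff_getElem.mp hj
    simp only [List.length_take] at hil
    have hik : i < k := by omega
    have hic : i < cs.length := by omega
    rw [List.getElem_take] at hie
    have hx0 : cs[i].1 < x := by
      have h := h1 i (by rw [hlen]; exact hic) hik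
      rwa [List.getElem_map] at h
    have hx : j.1 < x := by rw [← hie]; exact hx0
    simp only [decide_eq_true_eq]
    omega
  have hdrop : (cs.drop k).filter (fun j => decide (x ≤ j.1 ∧ j.2 ≤ hi))
      = (cs.drop k).filter (fun j => decide (j.2 ≤ hi)) := by
    apply List.filter_congr
    intro j hj
    obtain ⟨i, hil, hie⟩ := List.mem_iff_getElem.mp hj
    simp only [List.length_drop] at hil
    have hic : k + i < cs.length := by omega
    rw [List.getElem_drop] at hie
    have hx0 : x ≤ cs[k + i].1 := by
      have h := h2 (k + i) (by omega) (by rw [hlen]; exact hic)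
      rwa [List.getElem_map] at h
    have hx : x ≤ j.1 := by rw [← hie]; exact hx0
    by_cases hh : j.2 ≤ hi <;> simp [hx, hh]
  rw [htake, hdrop, List.nil_append]

-- pointwise permutation congruence for flatMap
theorem pv_flatMap_perm_congr {α β : Type} (l : List α) (f g : α → List β)
    (h : ∀ x ∈ l, (f x).Perm (g x)) : (l.flatMap f).Perm (l.flatMap g) := by
  induction l with
  | nil => simp
  | cons x l ih =>
    simp only [List.flatMap_cons]
    exact (h x (by simp)).append (ih (fun y hy => h y (by simp [hy])))

-- ===== VERDICT (by name: the statement is the Claim_ definition above) =====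
theorem fine_completion_spec : Claim_equal_fine_completion := by
  intro coarse fine frames _dom _pre
  unfold Spec_fine_completion fine_completion fine_completion_alt
  simp only [PySem.List.insert_zero, List.singleton_append, PySem.List.slice_from_one]
  apply PySem.List.sorted_eq_sorted_of_perm _ _ _ (fun a b h => by
    simpa using congrArg (fun x => ofLex x) h)
  set f2 := (if ((PySem.List.pyGet? (if ((PySem.List.pyGet? fine 0).getD (0, 0)).1 ≠ 0 then
      (PySem.List.pyGet? coarse 0).getD (0, 0) :: fine else fine) (-1)).getD (0, 0)).2 ≠ frames - 1 then
      (if ((PySem.List.pyGet? fine 0).getD (0, 0)).1 ≠ 0 then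
        (PySem.List.pyGet? coarse 0).getD (0, 0) :: fine else fine) ++ [(PySem.List.pyGet? coarse (-1)).getD (0, 0)]
    else (if ((PySem.List.pyGet? fine 0).getD (0, 0)).1 ≠ 0 then
      (PySem.List.pyGet? coarse 0).getD (0, 0) :: fine else fine)) with hf2
  -- B's nested loops → f2 ++ flatMap over the pairs
  have hBstep : ∀ (acc : List (Int × Int)) (p : (Int × Int) × (Int × Int)),
      (if p.1.2 ≠ p.2.1 then
        (PySem.List.slice (PySem.List.sorted coarse (fun p => toLex p) false)
            (some ((pvBisect ((PySem.List.sorted coarse (fun p => toLex p) false).map (·.1)) p.1.2 0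
              ((PySem.List.sorted coarse (fun p => toLex p) false).map (·.1)).length : Nat) : Int)) none).foldl
          (fun o c => if c.2 ≤ p.2.1 then o ++ [c] else o) acc
      else acc)
      = acc ++ (if p.1.2 ≠ p.2.1 then
          ((PySem.List.sorted coarse (fun p => toLex p) false).drop
              (pvBisect ((PySem.List.sorted coarse (fun p => toLex p) false).map (·.1)) p.1.2 0
                ((PySem.List.sorted coarse (fun p => toLex p) false).map (·.1)).length)).filter
            (fun j => decide (j.2 ≤ p.2.1))
        else []) := by
    intro acc p
    split_ifs with h
    · rw [PySem.List.slice_from_natCast, PySem.List.foldl_append_ite_eq_filter]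
    · simp
  rw [PySem.List.foldl_congr_mem _ _ _ _ (fun acc p _ => hBstep acc p), PySem.List.foldl_append_eq_flatMap]
  apply List.Perm.append_left
  rw [pv_common_eq]
  -- per pair: A's filter over coarse ~ B's filter over the sorted tail
  apply pv_flatMap_perm_congr
  intro p _
  split_ifs with h
  · have hs : (PySem.List.sorted coarse (fun p => toLex p) false).Pairwise (fun a b => a.1 ≤ b.1) := by
      refine (PySem.List.sorted_pairwise coarse (fun p => toLex p)).imp (fun hab => ?_)
      rcases (Prod.Lex.toLex_le_toLex).mp hab with h1 | ⟨h1, _⟩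
      · exact le_of_lt h1
      · exact le_of_eq h1
    rw [pv_filter_drop _ _ _ hs]
    exact ((PySem.List.sorted_perm coarse (fun p => toLex p) false).filter _).symm
  · exact List.Perm.refl _
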